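-- pv_equiv track=rewrite | github.com/akshaya2408/CD | slr2.py | check_slr
-- ===== SOURCE A (Python) =====
-- action = {
--     0: {'c': 'S3', 'd': 'S4'},
--     1: {'$': 'ACC'},
--     2: {'c': 'S3', 'd': 'S4'},
--     3: {'c': 'S3', 'd': 'S4'},
--     4: {'c': 'R3', 'd': 'R3', '$': 'R3'},
--     5: {'$': 'R1'},
--     6: {'c': 'R2', 'd': 'R2', '$': 'R2'}}
--
-- goto = {
--     0: {'S': 1, 'C': 2},
--     2: {'C': 5},
--     3: {'C': 6}}
--
-- productions = {
--     1: ('S', 2),   # S -> CC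
--     2: ('C', 2),   # C -> cC
--     3: ('C', 1)}
--
-- def check_slr(s):
--     s += '$'
--     stack = [0]
--     i = 0
--     while True:
--         state = stack[-1]
--         symbol = s[i]
--         if state not in action or symbol not in action[state]:
--             return False
--         act = action[state][symbol]
--         if act == 'ACC':
--             return True
--         elif act[0] == 'S':
--             stack.append(symbol)
--             stack.append(int(act[1:]))
--             i += 1
--         elif act[0] == 'R':
--             lhs, length = productions[int(act[1:])]
--             for _ in range(2 * length):
--                 stack.pop()
--             state = stack[-1]
--             if state not in goto or lhs not in goto[state]:
--                 return False
--             stack.append(lhs)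
--             stack.append(goto[state][lhs])
-- ===== SOURCE B (Python) =====
-- def check_slr(s):
--     # The SLR table accepts exactly c*dc*d of the part before the first '$'
--     # (the parser stops at the first '$', including the appended sentinel).
--     prefix = s.split('$', 1)[0]
--     rest = prefix.lstrip('c')
--     if not rest.startswith('d'):
--         return False
--     rest2 = rest[1:].lstrip('c')
--     return rest2 == 'd'
-- ===== Notes on version B (the rewrite author's own statement) =====
-- stated objective: simpler
-- what changed: Replaced the table-driven SLR(1) shift/reduce loop (action/goto/productions tables, explicit stack) by a direct check that the part of the input before the first '$' matches c*dc*d, the language this parse table accepts.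
import Mathlib
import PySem

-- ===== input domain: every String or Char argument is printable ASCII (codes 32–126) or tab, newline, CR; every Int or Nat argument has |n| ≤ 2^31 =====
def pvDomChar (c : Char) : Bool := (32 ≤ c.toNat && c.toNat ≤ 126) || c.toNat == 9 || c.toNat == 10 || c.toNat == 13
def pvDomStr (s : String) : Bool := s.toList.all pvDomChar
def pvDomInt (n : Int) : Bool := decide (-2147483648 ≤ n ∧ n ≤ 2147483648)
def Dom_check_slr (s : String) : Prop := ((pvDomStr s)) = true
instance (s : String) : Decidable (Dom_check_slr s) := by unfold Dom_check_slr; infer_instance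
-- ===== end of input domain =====

-- B replaces the table-driven SLR parse loop by a direct check that the part of the
-- input before the first '$' is c*dc*d (the language this SLR table accepts); objective: simpler.

-- ===== PORT A =====
-- The Python stack holds ints (states), the shifted 1-char symbols, and the
-- nonterminal strings 'S'/'C'; Ent is that mixed element type.
inductive Ent
  | iv : Int → Ent
  | sv : String → Ent
  | sc : Char → Ent
deriving DecidableEq, Repr

def actionTbl : PySem.Dict Ent (PySem.Dict Char String) := PySem.Dict.ofList [
  (Ent.iv 0, PySem.Dict.ofList [('c',"S3"),('d',"S4")]),
  (Ent.iv 1, PySem.Dict.ofList [('$',"ACC")]),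
  (Ent.iv 2, PySem.Dict.ofList [('c',"S3"),('d',"S4")]),
  (Ent.iv 3, PySem.Dict.ofList [('c',"S3"),('d',"S4")]),
  (Ent.iv 4, PySem.Dict.ofList [('c',"R3"),('d',"R3"),('$',"R3")]),
  (Ent.iv 5, PySem.Dict.ofList [('$',"R1")]),
  (Ent.iv 6, PySem.Dict.ofList [('c',"R2"),('d',"R2"),('$',"R2")])]

def gotoTbl : PySem.Dict Ent (PySem.Dict String Int) := PySem.Dict.ofList [
  (Ent.iv 0, PySem.Dict.ofList [("S",1),("C",2)]),
  (Ent.iv 2, PySem.Dict.ofList [("C",5)]),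
  (Ent.iv 3, PySem.Dict.ofList [("C",6)])]

def productionsTbl : PySem.Dict Int (String × Int) := PySem.Dict.ofList [(1,("S",2)),(2,("C",2)),(3,("C",1))]

-- One iteration of A's `while True` loop, with the module-level tables passed in
-- (`recur` = go around again).  `none => false` cases are where the Python raises
-- IndexError / where the `not in` checks return False; the final `recur stack rest`
-- is the (unreachable with these tables) fall-through where Python loops forever.
def loopBodyG (aT : PySem.Dict Ent (PySem.Dict Char String))
    (gT : PySem.Dict Ent (PySem.Dict String Int)) (pT : PySem.Dict Int (String × Int))
    (recur : List Ent → List Char → Bool) (stack : List Ent) : List Char → Bool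
  | [] => false                                         -- symbol = s[i]: IndexError (never reached: input ends with '$')
  | symbol :: rest' =>
    (stack.head?).elim false fun state =>               -- state = stack[-1] (IndexError → never reached)
    (PySem.Dict.get? aT state).elim false fun row =>    -- state not in action -> False
    (PySem.Dict.get? row symbol).elim false fun act =>  -- symbol not in action[state] -> False
    if act == "ACC" then true
    else if PySem.Str.pyGet? act 0 == some 'S' then     -- act[0] == 'S'
      (PySem.Int.ofStr? (PySem.Str.slice act (some 1) none)).elim false fun n =>   -- int(act[1:])
        recur (Ent.iv n :: Ent.sc symbol :: stack) rest'
    else if PySem.Str.pyGet? act 0 == some 'R' then     -- act[0] == 'R'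
      (PySem.Int.ofStr? (PySem.Str.slice act (some 1) none)).elim false fun n =>
      (PySem.Dict.get? pT n).elim false fun pr =>       -- lhs, length = productions[...] (KeyError → never reached)
        -- for _ in range(2*length): stack.pop()  (length = pr.2 ≥ 0 in the table; toNat exact)
        ((stack.drop (2 * pr.2).toNat).head?).elim false fun state2 =>   -- state = stack[-1]
        (PySem.Dict.get? gT state2).elim false fun grow =>     -- state not in goto -> False
        (PySem.Dict.get? grow pr.1).elim false fun g =>        -- lhs not in goto[state] -> False
          recur (Ent.iv g :: Ent.sv pr.1 :: stack.drop (2 * pr.2).toNat) (symbol :: rest')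
    else recur stack (symbol :: rest')                  -- no branch taken: Python loops forever (never reached)

def loopBody (recur : List Ent → List Char → Bool) (stack : List Ent) (rest : List Char) : Bool :=
  loopBodyG actionTbl gotoTbl productionsTbl recur stack rest

-- Fuel makes the while-loop total; the lemmas below show 4*|s|+16 is never exhausted.
def loopA : Nat → List Ent → List Char → Bool
  | 0, _, _ => false
  | fuel+1, stack, rest => loopBody (loopA fuel) stack rest

def check_slr (s : String) : Bool :=
  loopA (4 * s.toList.length + 16) [Ent.iv 0] (s.toList ++ ['$'])   -- s += '$'; stack = [0]; i = 0

-- ===== PORT B =====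
def check_slr_alt (s : String) : Bool :=
  let pre := s.toList.takeWhile (· != '$')       -- prefix = s.split('$', 1)[0]: chars before the first '$' (exact)
  let rest := pre.dropWhile (· == 'c')           -- rest = prefix.lstrip('c') (exact: strips the single char 'c')
  if rest.head? = some 'd' then                  -- rest.startswith('d')
    (rest.tail.dropWhile (· == 'c')) == ['d']    -- rest2 = rest[1:].lstrip('c'); rest2 == 'd'
  else false

-- ===== PRECONDITION & SPEC =====
def Spec_check_slr (s : String) (out : Bool) : Prop := out = check_slr_alt s
instance (s : String) (out : Bool) : Decidable (Spec_check_slr s out) := by unfold Spec_check_slr; infer_instance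

-- ===== CLAIM (what is proved, stated in full; the proofs are below) =====
def Claim_equal_check_slr : Prop := ∀ (s : String), Dom_check_slr s → Spec_check_slr s (check_slr s)

-- ===== LEMMAS AND PROOFS =====

lemma loopA_succ (f : Nat) (stack : List Ent) (rest : List Char) :
    loopA (f+1) stack rest = loopBodyG actionTbl gotoTbl productionsTbl (loopA f) stack rest := rfl

-- the rows of the tables, as literal dicts (definitionally equal to the ofList values)
def rowCD : PySem.Dict Char String := PySem.Dict.mk [('c',"S3"),('d',"S4")]
def rowR3 : PySem.Dict Char String := PySem.Dict.mk [('c',"R3"),('d',"R3"),('$',"R3")]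
def rowR1 : PySem.Dict Char String := PySem.Dict.mk [('$',"R1")]
def rowR2 : PySem.Dict Char String := PySem.Dict.mk [('c',"R2"),('d',"R2"),('$',"R2")]

lemma aT4 : PySem.Dict.get? actionTbl (Ent.iv 4) = some rowR3 := rfl
lemma aT5 : PySem.Dict.get? actionTbl (Ent.iv 5) = some rowR1 := rfl
lemma aT6 : PySem.Dict.get? actionTbl (Ent.iv 6) = some rowR2 := rfl

lemma rowCD_get (x : Char) :
    PySem.Dict.get? rowCD x = if x = 'c' then some "S3" else if x = 'd' then some "S4" else none := by
  unfold rowCD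
  rw [PySem.Dict.get?_mk_cons, PySem.Dict.get?_mk_cons]
  by_cases h1 : x = 'c'
  · subst h1; simp
  · by_cases h2 : x = 'd'
    · subst h2; simp
    · rw [if_neg (by simp [beq_iff_eq]; exact Ne.symm h1),
          if_neg (by simp [beq_iff_eq]; exact Ne.symm h2), if_neg h1, if_neg h2]
      rfl

lemma rowR3_get (x : Char) :
    PySem.Dict.get? rowR3 x = if x = 'c' ∨ x = 'd' ∨ x = '$' then some "R3" else none := by
  unfold rowR3
  rw [PySem.Dict.get?_mk_cons, PySem.Dict.get?_mk_cons, PySem.Dict.get?_mk_cons]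
  by_cases h1 : x = 'c'
  · subst h1; simp
  · by_cases h2 : x = 'd'
    · subst h2; simp
    · by_cases h3 : x = '$'
      · subst h3; simp
      · rw [if_neg (by simp [beq_iff_eq]; exact Ne.symm h1),
            if_neg (by simp [beq_iff_eq]; exact Ne.symm h2),
            if_neg (by simp [beq_iff_eq]; exact Ne.symm h3),
            if_neg (by simp [h1, h2, h3])]
        rfl

lemma rowR2_get (x : Char) :
    PySem.Dict.get? rowR2 x = if x = 'c' ∨ x = 'd' ∨ x = '$' then some "R2" else none := by
  unfold rowR2
  rw [PySem.Dict.get?_mk_cons, PySem.Dict.get?_mk_cons, PySem.Dict.get?_mk_cons]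
  by_cases h1 : x = 'c'
  · subst h1; simp
  · by_cases h2 : x = 'd'
    · subst h2; simp
    · by_cases h3 : x = '$'
      · subst h3; simp
      · rw [if_neg (by simp [beq_iff_eq]; exact Ne.symm h1),
            if_neg (by simp [beq_iff_eq]; exact Ne.symm h2),
            if_neg (by simp [beq_iff_eq]; exact Ne.symm h3),
            if_neg (by simp [h1, h2, h3])]
        rfl

lemma rowR1_get (x : Char) :
    PySem.Dict.get? rowR1 x = if x = '$' then some "R1" else none := by
  unfold rowR1
  rw [PySem.Dict.get?_mk_cons]
  by_cases h : x = '$'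
  · subst h; simp
  · rw [if_neg (by simp [beq_iff_eq]; exact Ne.symm h), if_neg h]
    rfl

-- generic evaluation of one loop iteration, with all lookups as hypotheses
lemma loopBodyG_actNone (aT gT pT) (recur : List Ent → List Char → Bool) (stack : List Ent)
    (x : Char) (l : List Char) (state : Ent) (row : PySem.Dict Char String)
    (hst : stack.head? = some state)
    (hrow : PySem.Dict.get? aT state = some row)
    (hact : PySem.Dict.get? row x = none) :
    loopBodyG aT gT pT recur stack (x :: l) = false := by
  simp only [loopBodyG, hst, hrow, hact, Option.elim_some, Option.elim_none]

lemma loopBodyG_reduce (aT gT pT) (recur : List Ent → List Char → Bool) (stack : List Ent)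
    (x : Char) (l : List Char) (state : Ent) (row : PySem.Dict Char String) (act : String) (n : Int)
    (lhs : String) (len : Int) (state2 : Ent) (grow : PySem.Dict String Int) (g : Int)
    (hst : stack.head? = some state)
    (hrow : PySem.Dict.get? aT state = some row)
    (hact : PySem.Dict.get? row x = some act)
    (hacc : (act == "ACC") = false)
    (hS : (PySem.Str.pyGet? act 0 == some 'S') = false)
    (hR : (PySem.Str.pyGet? act 0 == some 'R') = true)
    (hn : PySem.Int.ofStr? (PySem.Str.slice act (some 1) none) = some n)
    (hprod : PySem.Dict.get? pT n = some (lhs, len))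
    (hst2 : (stack.drop (2 * len).toNat).head? = some state2)
    (hgoto : PySem.Dict.get? gT state2 = some grow)
    (hg : PySem.Dict.get? grow lhs = some g) :
    loopBodyG aT gT pT recur stack (x :: l) =
      recur (Ent.iv g :: Ent.sv lhs :: stack.drop (2 * len).toNat) (x :: l) := by
  simp only [loopBodyG, hst, hrow, hact, hacc, hS, hR, hn, hprod, hst2, hgoto, hg,
    Option.elim_some, Bool.false_eq_true, if_false, if_true]

-- reachable stack shapes: p1 k = k shifted c's over state 0; p2 m = m shifted c's over [2, C, 0]
def p1 : Nat → List Ent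
  | 0 => [Ent.iv 0]
  | k+1 => Ent.iv 3 :: Ent.sc 'c' :: p1 k

def p2 : Nat → List Ent
  | 0 => [Ent.iv 2, Ent.sv "C", Ent.iv 0]
  | m+1 => Ent.iv 3 :: Ent.sc 'c' :: p2 m

lemma p1_head (k : Nat) : (p1 k).head? = some (Ent.iv (if k = 0 then 0 else 3)) := by
  cases k <;> rfl

lemma p2_head (m : Nat) : (p2 m).head? = some (Ent.iv (if m = 0 then 2 else 3)) := by
  cases m <;> rfl

-- concrete loop steps on those shapes
lemma step_c_p1 (f k : Nat) (l : List Char) :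
    loopA (f+1) (p1 k) ('c' :: l) = loopA f (p1 (k+1)) l := by cases k <;> rfl

lemma step_c_p2 (f m : Nat) (l : List Char) :
    loopA (f+1) (p2 m) ('c' :: l) = loopA f (p2 (m+1)) l := by cases m <;> rfl

lemma step_d_p1 (f k : Nat) (l : List Char) :
    loopA (f+1) (p1 k) ('d' :: l) = loopA f (Ent.iv 4 :: Ent.sc 'd' :: p1 k) l := by
  cases k <;> rfl

lemma step_d_p2 (f m : Nat) (l : List Char) :
    loopA (f+1) (p2 m) ('d' :: l) = loopA f (Ent.iv 4 :: Ent.sc 'd' :: p2 m) l := by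
  cases m <;> rfl

lemma loopA_nil (f : Nat) (stack : List Ent) : loopA f stack [] = false := by
  cases f with
  | zero => rfl
  | succ f => rw [loopA_succ]; unfold loopBodyG; cases stack <;> rfl

lemma miss_cd (f : Nat) (stack : List Ent) (state : Ent) (x : Char) (l : List Char)
    (hst : stack.head? = some state) (hA : PySem.Dict.get? actionTbl state = some rowCD)
    (h1 : ¬ x = 'c') (h2 : ¬ x = 'd') :
    loopA (f+1) stack (x :: l) = false := by
  rw [loopA_succ]
  exact loopBodyG_actNone _ _ _ _ _ _ _ _ _ hst hA (by rw [rowCD_get, if_neg h1, if_neg h2])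

lemma miss_r3 (f : Nat) (stack : List Ent) (x : Char) (l : List Char)
    (hst : stack.head? = some (Ent.iv 4)) (hx : ¬ (x = 'c' ∨ x = 'd' ∨ x = '$')) :
    loopA (f+1) stack (x :: l) = false := by
  rw [loopA_succ]
  exact loopBodyG_actNone _ _ _ _ _ _ _ _ _ hst aT4 (by rw [rowR3_get, if_neg hx])

lemma miss_r2 (f : Nat) (stack : List Ent) (x : Char) (l : List Char)
    (hst : stack.head? = some (Ent.iv 6)) (hx : ¬ (x = 'c' ∨ x = 'd' ∨ x = '$')) :
    loopA (f+1) stack (x :: l) = false := by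
  rw [loopA_succ]
  exact loopBodyG_actNone _ _ _ _ _ _ _ _ _ hst aT6 (by rw [rowR2_get, if_neg hx])

lemma miss_r1 (f : Nat) (stack : List Ent) (x : Char) (l : List Char)
    (hst : stack.head? = some (Ent.iv 5)) (hx : ¬ x = '$') :
    loopA (f+1) stack (x :: l) = false := by
  rw [loopA_succ]
  exact loopBodyG_actNone _ _ _ _ _ _ _ _ _ hst aT5 (by rw [rowR1_get, if_neg hx])

-- R3 from just-shifted d over p1 k / p2 m (on any symbol in {c, d, $})
lemma step_R3_p1 (f k : Nat) (x : Char) (l : List Char) (hx : x = 'c' ∨ x = 'd' ∨ x = '$') :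
    loopA (f+1) (Ent.iv 4 :: Ent.sc 'd' :: p1 k) (x :: l) =
      loopA f (Ent.iv (if k = 0 then 2 else 6) :: Ent.sv "C" :: p1 k) (x :: l) := by
  rw [loopA_succ]
  have h := loopBodyG_reduce actionTbl gotoTbl productionsTbl (loopA f)
      (Ent.iv 4 :: Ent.sc 'd' :: p1 k) x l (Ent.iv 4) rowR3 "R3" 3 "C" 1
      (Ent.iv (if k = 0 then 0 else 3))
      (if k = 0 then PySem.Dict.mk [("S",1),("C",2)] else PySem.Dict.mk [("C",6)])
      (if k = 0 then 2 else 6)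
      rfl aT4 (by rw [rowR3_get, if_pos hx]) (by decide) (by decide) (by decide) (by decide)
      (by decide) (by exact p1_head k) (by cases k <;> rfl) (by cases k <;> rfl)
  rw [h]
  cases k <;> rfl

lemma step_R3_p2 (f m : Nat) (x : Char) (l : List Char) (hx : x = 'c' ∨ x = 'd' ∨ x = '$') :
    loopA (f+1) (Ent.iv 4 :: Ent.sc 'd' :: p2 m) (x :: l) =
      loopA f (Ent.iv (if m = 0 then 5 else 6) :: Ent.sv "C" :: p2 m) (x :: l) := by
  rw [loopA_succ]
  have h := loopBodyG_reduce actionTbl gotoTbl productionsTbl (loopA f)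
      (Ent.iv 4 :: Ent.sc 'd' :: p2 m) x l (Ent.iv 4) rowR3 "R3" 3 "C" 1
      (Ent.iv (if m = 0 then 2 else 3))
      (if m = 0 then PySem.Dict.mk [("C",5)] else PySem.Dict.mk [("C",6)])
      (if m = 0 then 5 else 6)
      rfl aT4 (by rw [rowR3_get, if_pos hx]) (by decide) (by decide) (by decide) (by decide)
      (by decide) (by exact p2_head m) (by cases m <;> rfl) (by cases m <;> rfl)
  rw [h]
  cases m <;> rfl

-- R2 cascade step: C over a c-pair over p2 m (resp. p1 k)
lemma step_R2_p2 (f m : Nat) (x : Char) (l : List Char) (hx : x = 'c' ∨ x = 'd' ∨ x = '$') :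
    loopA (f+1) (Ent.iv 6 :: Ent.sv "C" :: p2 (m+1)) (x :: l) =
      loopA f (Ent.iv (if m = 0 then 5 else 6) :: Ent.sv "C" :: p2 m) (x :: l) := by
  rw [loopA_succ]
  have h := loopBodyG_reduce actionTbl gotoTbl productionsTbl (loopA f)
      (Ent.iv 6 :: Ent.sv "C" :: p2 (m+1)) x l (Ent.iv 6) rowR2 "R2" 2 "C" 2
      (Ent.iv (if m = 0 then 2 else 3))
      (if m = 0 then PySem.Dict.mk [("C",5)] else PySem.Dict.mk [("C",6)])
      (if m = 0 then 5 else 6)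
      rfl aT6 (by rw [rowR2_get, if_pos hx]) (by decide) (by decide) (by decide) (by decide)
      (by decide) (by exact p2_head m) (by cases m <;> rfl) (by cases m <;> rfl)
  rw [h]
  cases m <;> rfl

lemma step_R2_p1 (f k : Nat) (x : Char) (l : List Char) (hx : x = 'c' ∨ x = 'd' ∨ x = '$') :
    loopA (f+1) (Ent.iv 6 :: Ent.sv "C" :: p1 (k+1)) (x :: l) =
      loopA f (Ent.iv (if k = 0 then 2 else 6) :: Ent.sv "C" :: p1 k) (x :: l) := by
  rw [loopA_succ]
  have h := loopBodyG_reduce actionTbl gotoTbl productionsTbl (loopA f)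
      (Ent.iv 6 :: Ent.sv "C" :: p1 (k+1)) x l (Ent.iv 6) rowR2 "R2" 2 "C" 2
      (Ent.iv (if k = 0 then 0 else 3))
      (if k = 0 then PySem.Dict.mk [("S",1),("C",2)] else PySem.Dict.mk [("C",6)])
      (if k = 0 then 2 else 6)
      rfl aT6 (by rw [rowR2_get, if_pos hx]) (by decide) (by decide) (by decide) (by decide)
      (by decide) (by exact p1_head k) (by cases k <;> rfl) (by cases k <;> rfl)
  rw [h]
  cases k <;> rfl

-- R1 + ACC from the fully reduced second C:  [5, C, 2, C, 0] and input '$'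
lemma step_R1_acc (f : Nat) (l : List Char) :
    loopA (f+2) (Ent.iv 5 :: Ent.sv "C" :: p2 0) ('$' :: l) = true := rfl

-- what the parser computes, expressed on the char list
def eatC (l : List Char) : List Char := l.dropWhile (· == 'c')

def spec2 (l : List Char) : Bool :=
  match eatC l with
  | 'd' :: x :: _ => x == '$'
  | _ => false

def spec1 (l : List Char) : Bool :=
  match eatC l with
  | 'd' :: r => spec2 r
  | _ => false

lemma eatC_cons_c (l : List Char) : eatC ('c' :: l) = eatC l := by
  simp [eatC, List.dropWhile]

lemma eatC_cons_ne (a : Char) (l : List Char) (h : ¬ a = 'c') : eatC (a :: l) = a :: l := by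
  simp only [eatC, List.dropWhile, beq_eq_false_iff_ne.mpr h]

lemma spec2_cons_c (t : List Char) : spec2 ('c' :: t) = spec2 t := by
  simp [spec2, eatC_cons_c]

lemma spec2_cons_d (t : List Char) :
    spec2 ('d' :: t) = (t.head? == some '$') := by
  rw [spec2, eatC_cons_ne 'd' t (by decide)]
  cases t <;> simp

lemma spec2_cons_ne (a : Char) (t : List Char) (h1 : ¬ a = 'c') (h2 : ¬ a = 'd') :
    spec2 (a :: t) = false := by
  rw [spec2, eatC_cons_ne a t h1]
  cases t with
  | nil => simp
  | cons y t2 => simp [h2]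

lemma spec1_cons_c (t : List Char) : spec1 ('c' :: t) = spec1 t := by
  simp [spec1, eatC_cons_c]

lemma spec1_cons_d (t : List Char) : spec1 ('d' :: t) = spec2 t := by
  rw [spec1, eatC_cons_ne 'd' t (by decide)]
  rfl

lemma spec1_cons_ne (a : Char) (t : List Char) (h1 : ¬ a = 'c') (h2 : ¬ a = 'd') :
    spec1 (a :: t) = false := by
  rw [spec1, eatC_cons_ne a t h1]
  cases t with
  | nil => simp [h2]
  | cons y t2 => simp [h2]

-- CHAIN 2: C on top of p2 m looking at x: R2 cascade, then R1 and ACC iff x = '$'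
lemma chain2 : ∀ (m : Nat) (x : Char) (l : List Char) (f : Nat), m + 3 ≤ f →
    loopA f (Ent.iv (if m = 0 then 5 else 6) :: Ent.sv "C" :: p2 m) (x :: l) = (x == '$') := by
  intro m
  induction m with
  | zero =>
    intro x l f hf
    rw [show (if (0:Nat) = 0 then (5:Int) else 6) = 5 from rfl]
    by_cases hx : x = '$'
    · subst hx
      obtain ⟨f', rfl⟩ : ∃ f', f = f' + 2 := ⟨f - 2, by omega⟩
      rw [step_R1_acc]
      rfl
    · obtain ⟨f', rfl⟩ : ∃ f', f = f' + 1 := ⟨f - 1, by omega⟩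
      rw [miss_r1 f' _ x l rfl hx]
      simp [hx]
  | succ m ih =>
    intro x l f hf
    obtain ⟨f', rfl⟩ : ∃ f', f = f' + 1 := ⟨f - 1, by omega⟩
    rw [show (if m + 1 = 0 then (5:Int) else 6) = 6 from rfl]
    by_cases hx : x = 'c' ∨ x = 'd' ∨ x = '$'
    · rw [step_R2_p2 f' m x l hx]
      exact ih x l f' (by omega)
    · rw [miss_r2 f' _ x l rfl hx]
      have hx3 : ¬ x = '$' := fun h => hx (Or.inr (Or.inr h))
      simp [hx3]

-- PHASE 2: running from p2 m, the input must be c* d and then '$'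
lemma phase2 : ∀ (l : List Char) (m f : Nat), 2 * l.length + m + 6 ≤ f →
    loopA f (p2 m) l = spec2 l := by
  intro l
  induction l with
  | nil => intro m f _; rw [loopA_nil]; rfl
  | cons a l ih =>
    intro m f hf
    obtain ⟨f', rfl⟩ : ∃ f', f = f' + 1 := ⟨f - 1, by omega⟩
    by_cases hc : a = 'c'
    · subst hc
      have hh : 2 * l.length + (m + 1) + 6 ≤ f' := by
        have h := hf; simp only [List.length_cons] at h; omega
      rw [step_c_p2, ih (m+1) f' hh, spec2_cons_c]
    · by_cases hd : a = 'd'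
      · subst hd
        rw [step_d_p2, spec2_cons_d]
        cases l with
        | nil => rw [loopA_nil]; simp
        | cons x l2 =>
          obtain ⟨f'', rfl⟩ : ∃ f'', f' = f'' + 1 := ⟨f' - 1, by omega⟩
          by_cases hx : x = 'c' ∨ x = 'd' ∨ x = '$'
          · rw [step_R3_p2 f'' m x l2 hx,
              chain2 m x l2 f'' (by simp only [List.length_cons] at hf; omega)]
            simp
          · rw [miss_r3 f'' _ x l2 rfl hx]
            have hx3 : ¬ x = '$' := fun h => hx (Or.inr (Or.inr h))
            simp [hx3]
      · rw [miss_cd f' (p2 m) (Ent.iv (if m = 0 then 2 else 3)) a l (p2_head m)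
              (by cases m <;> rfl) hc hd, spec2_cons_ne a l hc hd]

-- CHAIN 1: C on top of p1 k: R2 cascade down to p2 0, then run phase 2
lemma chain1 : ∀ (k : Nat) (l : List Char) (f : Nat), 2 * l.length + k + 8 ≤ f →
    loopA f (Ent.iv (if k = 0 then 2 else 6) :: Ent.sv "C" :: p1 k) l = spec2 l := by
  intro k
  induction k with
  | zero =>
    intro l f hf
    rw [show (if (0:Nat) = 0 then (2:Int) else 6) = 2 from rfl]
    exact phase2 l 0 f (by omega)
  | succ k ih =>
    intro l f hf
    obtain ⟨f', rfl⟩ : ∃ f', f = f' + 1 := ⟨f - 1, by omega⟩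
    rw [show (if k + 1 = 0 then (2:Int) else 6) = 6 from rfl]
    cases l with
    | nil => rw [loopA_nil]; rfl
    | cons x l2 =>
      by_cases hx : x = 'c' ∨ x = 'd' ∨ x = '$'
      · rw [step_R2_p1 f' k x l2 hx]
        exact ih (x :: l2) f' (by simp only [List.length_cons] at hf ⊢; omega)
      · rw [miss_r2 f' _ x l2 rfl hx]
        have hxc : ¬ x = 'c' := fun h => hx (Or.inl h)
        have hxd : ¬ x = 'd' := fun h => hx (Or.inr (Or.inl h))
        rw [spec2_cons_ne x l2 hxc hxd]

-- PHASE 1: running from p1 k, the input must be c* d, then phase 2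
lemma phase1 : ∀ (l : List Char) (k f : Nat), 2 * l.length + k + 10 ≤ f →
    loopA f (p1 k) l = spec1 l := by
  intro l
  induction l with
  | nil => intro k f _; rw [loopA_nil]; rfl
  | cons a l ih =>
    intro k f hf
    obtain ⟨f', rfl⟩ : ∃ f', f = f' + 1 := ⟨f - 1, by omega⟩
    by_cases hc : a = 'c'
    · subst hc
      rw [step_c_p1, ih (k+1) f' (by simp only [List.length_cons] at hf; omega), spec1_cons_c]
    · by_cases hd : a = 'd'
      · subst hd
        rw [step_d_p1, spec1_cons_d]
        cases l with
        | nil => rw [loopA_nil]; rfl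
        | cons x l2 =>
          obtain ⟨f'', rfl⟩ : ∃ f'', f' = f'' + 1 := ⟨f' - 1, by omega⟩
          by_cases hx : x = 'c' ∨ x = 'd' ∨ x = '$'
          · rw [step_R3_p1 f'' k x l2 hx,
              chain1 k (x :: l2) f'' (by simp only [List.length_cons] at hf ⊢; omega)]
          · rw [miss_r3 f'' _ x l2 rfl hx]
            have hxc : ¬ x = 'c' := fun h => hx (Or.inl h)
            have hxd : ¬ x = 'd' := fun h => hx (Or.inr (Or.inl h))
            rw [spec2_cons_ne x l2 hxc hxd]
      · rw [miss_cd f' (p1 k) (Ent.iv (if k = 0 then 0 else 3)) a l (p1_head k)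
              (by cases k <;> rfl) hc hd, spec1_cons_ne a l hc hd]

-- gluing: the parser's verdict on l ++ ['$'] is B's check on l
lemma glue2 : ∀ l : List Char,
    spec2 (l ++ ['$']) = (((l.takeWhile (· != '$')).dropWhile (· == 'c')) == ['d']) := by
  intro l
  induction l with
  | nil => rfl
  | cons a l ih =>
    by_cases hc : a = 'c'
    · subst hc
      simpa [spec2_cons_c, List.takeWhile, List.dropWhile] using ih
    · by_cases hd : a = 'd'
      · subst hd
        cases l with
        | nil => rfl
        | cons y l2 =>
          by_cases hy : y = '$'
          · subst hy
            simp [spec2_cons_d, List.takeWhile]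
          · simp [spec2_cons_d, List.takeWhile, hy,
              show (y != '$') = true from by simp [hy]]
      · by_cases hS : a = '$'
        · subst hS
          rw [show ('$' :: l) ++ ['$'] = '$' :: (l ++ ['$']) from rfl,
            spec2_cons_ne '$' (l ++ ['$']) (by decide) (by decide)]
          simp [List.takeWhile]
        · rw [show (a :: l) ++ ['$'] = a :: (l ++ ['$']) from rfl,
            spec2_cons_ne a (l ++ ['$']) hc hd]
          simp [List.takeWhile, show (a != '$') = true from by simp [hS],
            show (a == 'c') = false from by simp [hc], hd]

lemma glue1 : ∀ l : List Char,
    spec1 (l ++ ['$']) =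
      (let rest := (l.takeWhile (· != '$')).dropWhile (· == 'c')
       if rest.head? = some 'd' then (rest.tail.dropWhile (· == 'c')) == ['d'] else false) := by
  intro l
  induction l with
  | nil => rfl
  | cons a l ih =>
    by_cases hc : a = 'c'
    · subst hc
      simpa [spec1_cons_c, List.takeWhile, List.dropWhile] using ih
    · by_cases hd : a = 'd'
      · subst hd
        have h2 := glue2 l
        rw [show ('d' :: l) ++ ['$'] = 'd' :: (l ++ ['$']) from rfl, spec1_cons_d, h2]
        simp [List.takeWhile]
      · by_cases hS : a = '$'
        · subst hS
          rw [show ('$' :: l) ++ ['$'] = '$' :: (l ++ ['$']) from rfl,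
            spec1_cons_ne '$' (l ++ ['$']) (by decide) (by decide)]
          simp [List.takeWhile]
        · rw [show (a :: l) ++ ['$'] = a :: (l ++ ['$']) from rfl,
            spec1_cons_ne a (l ++ ['$']) hc hd]
          simp [List.takeWhile, show (a != '$') = true from by simp [hS],
            show (a == 'c') = false from by simp [hc], hd]

-- ===== VERDICT (by name: the statement is the Claim_ definition above) =====
theorem check_slr_spec : Claim_equal_check_slr := by
  intro s _hd
  unfold Spec_check_slr check_slr check_slr_alt
  have h1 : loopA (4 * s.toList.length + 16) [Ent.iv 0] (s.toList ++ ['$']) =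
      spec1 (s.toList ++ ['$']) := by
    have := phase1 (s.toList ++ ['$']) 0 (4 * s.toList.length + 16) (by simp; omega)
    simpa [p1] using this
  rw [h1, glue1]
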